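-- pv_equiv track=rewrite | github.com/cuioss/plan-marshall | marketplace/bundles/plan-marshall/skills/manage-execution-manifest/scripts/manage-execution-manifest.py | _bot_enforcement_insert_index
-- ===== SOURCE A (Python) =====
-- def _bot_enforcement_insert_index(phase_6_steps: list[str]) -> int:
--     """Resolve the canonical insertion position for ``automated-review``.
--
--     The remediation must place ``automated-review`` somewhere it can run before
--     plan-mutating steps (notably ``archive-plan``, which moves the plan
--     directory). ``phase_6_steps`` carries boundary-normalized bare default
--     names (plus possibly the project-prefixed early sync step), so anchor
--     lookups compare plain strings without per-site stripping. Resolution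
--     order:
--
--     1. Immediately after ``create-pr`` (its natural neighbour in the
--        candidate ordering — review runs against the freshly-opened PR).
--     2. Else immediately before the first plan-mutating step
--        (``archive-plan``, ``record-metrics``,
--        ``plan-marshall:plan-retrospective``, ``branch-cleanup``).
--     3. Else at the end of the list (no anchors found).
--     """
--     for index, step in enumerate(phase_6_steps):
--         if step == 'create-pr':
--             return index + 1
--     plan_mutating = {
--         'archive-plan',
--         'record-metrics',
--         'branch-cleanup',
--         'plan-marshall:plan-retrospective',
--     }
--     for index, step in enumerate(phase_6_steps):
--         if step in plan_mutating:
--             return index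
--     return len(phase_6_steps)
-- ===== SOURCE B (Python) =====
-- _PLAN_MUTATING = frozenset({
--     'archive-plan',
--     'record-metrics',
--     'branch-cleanup',
--     'plan-marshall:plan-retrospective',
-- })
--
--
-- def _bot_enforcement_insert_index(phase_6_steps: list[str]) -> int:
--     fallback = None
--     for index, step in enumerate(phase_6_steps):
--         if step == 'create-pr':
--             return index + 1
--         if fallback is None and step in _PLAN_MUTATING:
--             fallback = index
--     return fallback if fallback is not None else len(phase_6_steps)
-- ===== Notes on version B (the rewrite author's own statement) =====
-- stated objective: alternative
-- what changed: Replaces A's two sequential scans (first for 'create-pr', then for the first plan-mutating step) with a single pass that remembers the first plan-mutating index as a fallback and still lets a later 'create-pr' win.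
import Mathlib
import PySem

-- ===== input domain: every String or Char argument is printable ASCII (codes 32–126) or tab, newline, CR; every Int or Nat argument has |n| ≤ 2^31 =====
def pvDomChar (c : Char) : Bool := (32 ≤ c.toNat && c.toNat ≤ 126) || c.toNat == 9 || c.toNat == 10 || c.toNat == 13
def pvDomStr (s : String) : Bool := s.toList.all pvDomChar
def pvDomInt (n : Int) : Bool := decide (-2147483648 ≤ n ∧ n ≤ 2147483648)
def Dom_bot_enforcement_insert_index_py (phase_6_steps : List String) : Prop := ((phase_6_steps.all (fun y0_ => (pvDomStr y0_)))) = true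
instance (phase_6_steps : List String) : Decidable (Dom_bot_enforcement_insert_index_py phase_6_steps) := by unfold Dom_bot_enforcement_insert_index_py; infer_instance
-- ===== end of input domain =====

-- B fuses A's two ordered scans into one pass remembering the first plan-mutating index as a fallback (alternative decomposition, same O(n) cost).

-- ===== PORT A =====
def pvPlanMutating : List String :=
  ["archive-plan", "record-metrics", "branch-cleanup", "plan-marshall:plan-retrospective"]

-- first loop: return index+1 at the first 'create-pr'
def pvLoop1 (steps : List String) (index : Int) : Option Int :=
  match steps with
  | [] => none
  | step :: rest => if step = "create-pr" then some (index + 1) else pvLoop1 rest (index + 1)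

-- second loop: return the index of the first plan-mutating step
def pvLoop2 (steps : List String) (index : Int) : Option Int :=
  match steps with
  | [] => none
  | step :: rest => if step ∈ pvPlanMutating then some index else pvLoop2 rest (index + 1)

def bot_enforcement_insert_index_py (phase_6_steps : List String) : Int :=
  match pvLoop1 phase_6_steps 0 with
  | some v => v
  | none =>
    match pvLoop2 phase_6_steps 0 with
    | some v => v
    | none => (phase_6_steps.length : Int)

-- ===== PORT B =====
-- single pass: 'create-pr' returns immediately; first plan-mutating index is kept as fallback
def pvAltLoop (steps : List String) (index : Int) (fallback : Option Int) : Int :=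
  match steps with
  | [] => fallback.getD index
  | step :: rest =>
    if step = "create-pr" then index + 1
    else pvAltLoop rest (index + 1)
      (if fallback = none ∧ step ∈ pvPlanMutating then some index else fallback)

def bot_enforcement_insert_index_py_alt (phase_6_steps : List String) : Int :=
  pvAltLoop phase_6_steps 0 none

-- ===== PRECONDITION & SPEC =====
def Spec_bot_enforcement_insert_index_py (phase_6_steps : List String) (out : Int) : Prop := out = bot_enforcement_insert_index_py_alt phase_6_steps
instance (phase_6_steps : List String) (out : Int) : Decidable (Spec_bot_enforcement_insert_index_py phase_6_steps out) := by unfold Spec_bot_enforcement_insert_index_py; infer_instance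

-- ===== CLAIM (what is proved, stated in full; the proofs are below) =====
def Claim_equal_bot_enforcement_insert_index_py : Prop := ∀ (phase_6_steps : List String), Dom_bot_enforcement_insert_index_py phase_6_steps → Spec_bot_enforcement_insert_index_py phase_6_steps (bot_enforcement_insert_index_py phase_6_steps)

-- ===== LEMMAS AND PROOFS =====

-- the fused loop computes: first-'create-pr' result if any, else the fallback, else
-- the first plan-mutating index, else index + length
theorem pvAltLoop_eq (steps : List String) : ∀ (index : Int) (fallback : Option Int),
    pvAltLoop steps index fallback =
      match pvLoop1 steps index with
      | some v => v
      | none =>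
        match fallback with
        | some j => j
        | none =>
          match pvLoop2 steps index with
          | some v => v
          | none => index + steps.length := by
  induction steps with
  | nil => intro index fallback; cases fallback <;> simp [pvAltLoop, pvLoop1, pvLoop2]
  | cons step rest ih =>
    intro index fallback
    by_cases h1 : step = "create-pr"
    · simp [pvAltLoop, pvLoop1, h1]
    · by_cases h2 : step ∈ pvPlanMutating
      · cases fallback with
        | none =>
          simp only [pvAltLoop, pvLoop1, pvLoop2, h1, h2, ih]
          cases pvLoop1 rest (index + 1) <;> simp
        | some j =>
          simp only [pvAltLoop, pvLoop1, h1, h2, ih]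
          cases pvLoop1 rest (index + 1) <;> simp
      · cases fallback with
        | none =>
          simp only [pvAltLoop, pvLoop1, h1, h2, ih]
          cases pvLoop1 rest (index + 1) <;>
            cases h : pvLoop2 rest (index + 1) <;>
              simp [pvLoop2, h2, h] <;> ring
        | some j =>
          simp only [pvAltLoop, pvLoop1, h1, h2, ih]
          cases pvLoop1 rest (index + 1) <;> simp

-- ===== VERDICT (by name: the statement is the Claim_ definition above) =====
theorem bot_enforcement_insert_index_py_spec : Claim_equal_bot_enforcement_insert_index_py := by
  intro phase_6_steps _
  unfold Spec_bot_enforcement_insert_index_py bot_enforcement_insert_index_py bot_enforcement_insert_index_py_alt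
  rw [pvAltLoop_eq]
  cases pvLoop1 phase_6_steps 0 <;> [skip; rfl]
  cases pvLoop2 phase_6_steps 0 <;> simp
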